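-- pv_equiv track=rewrite | github.com/TEAMLAB-Lecture/morsecode-jy1559 | morsecode.py | is_validated_english_sentence
-- ===== SOURCE A (Python) =====
-- def is_validated_english_sentence(user_input):
--     n = 0
--     t = ['_','@','#','$','%','^','&','*','(',')','-','+','=','[',']','{','}','\"','\'', ';',':','|','\\','~']
--     m = ['.',',','!','?',' ']
--     for x in user_input:
--         if x.isdigit() or x in t: return False
--         if x not in m: n+=1
--     if n: return True
--     else: return False
-- ===== SOURCE B (Python) =====
-- def is_validated_english_sentence(user_input):
--     t = {'_','@','#','$','%','^','&','*','(',')','-','+','=','[',']','{','}','"',"'",';',':','|','\\','~'}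
--     m = {'.', ',', '!', '?', ' '}
--     chars = set(user_input)
--     if any(c.isdigit() for c in chars) or (chars & t):
--         return False
--     return bool(chars - m)
-- ===== Notes on version B (the rewrite author's own statement) =====
-- stated objective: idiomatic
-- what changed: Replaces A's per-character early-return loop with a running counter by a one-shot dedup (set(user_input)) plus set algebra: False on any digit or non-empty intersection with the forbidden set, else True iff the distinct chars minus the allowed-punctuation set is non-empty.
import Mathlib
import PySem

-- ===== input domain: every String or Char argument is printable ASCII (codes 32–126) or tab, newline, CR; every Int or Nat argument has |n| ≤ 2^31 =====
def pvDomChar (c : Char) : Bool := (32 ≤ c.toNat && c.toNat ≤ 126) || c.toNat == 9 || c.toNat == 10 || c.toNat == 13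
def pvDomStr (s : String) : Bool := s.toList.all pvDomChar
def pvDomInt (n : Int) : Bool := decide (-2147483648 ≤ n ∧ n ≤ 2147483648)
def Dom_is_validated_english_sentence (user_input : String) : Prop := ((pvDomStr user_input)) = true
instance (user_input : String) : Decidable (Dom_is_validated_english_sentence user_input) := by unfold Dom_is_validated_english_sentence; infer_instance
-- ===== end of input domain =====

-- B replaces A's per-character counter loop by a dedup set plus set algebra (same results; structural change only).

-- ===== PORT A =====
def pvTList : List Char := ['_','@','#','$','%','^','&','*','(',')','-','+','=','[',']','{','}','"','\'',';',':','|','\\','~']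
def pvMList : List Char := ['.',',','!','?',' ']

-- the 'for x in user_input' loop carrying the counter n, with the trailing 'if n: … else: …'
def pvALoop : List Char → Int → Bool
  | [], n => if n ≠ 0 then true else false
  | x :: xs, n =>
    if PySem.Chars.isdigit x || pvTList.contains x then false
    else if ! pvMList.contains x then pvALoop xs (n + 1)
    else pvALoop xs n

def is_validated_english_sentence (user_input : String) : Bool :=
  pvALoop user_input.toList 0

-- ===== PORT B =====
def pvTSet : PySem.Set Char := PySem.Set.ofList pvTList
def pvMSet : PySem.Set Char := PySem.Set.ofList pvMList

def is_validated_english_sentence_alt (user_input : String) : Bool :=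
  let chars : PySem.Set Char := PySem.Set.ofList user_input.toList
  if chars.any (fun c => PySem.Chars.isdigit c) || !(PySem.Set.inter chars pvTSet).isEmpty then
    false
  else
    !(PySem.Set.diff chars pvMSet).isEmpty

-- ===== PRECONDITION & SPEC =====
def Spec_is_validated_english_sentence (user_input : String) (out : Bool) : Prop := out = is_validated_english_sentence_alt user_input
instance (user_input : String) (out : Bool) : Decidable (Spec_is_validated_english_sentence user_input out) := by unfold Spec_is_validated_english_sentence; infer_instance

-- ===== CLAIM (what is proved, stated in full; the proofs are below) =====
def Claim_equal_is_validated_english_sentence : Prop := ∀ (user_input : String), Dom_is_validated_english_sentence user_input → Spec_is_validated_english_sentence user_input (is_validated_english_sentence user_input)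

-- ===== LEMMAS AND PROOFS =====

-- characterisation of A's loop
theorem pvALoop_eq (l : List Char) (n : Int) (hn : 0 ≤ n) :
    pvALoop l n =
      (!(l.any (fun c => PySem.Chars.isdigit c || pvTList.contains c)) &&
        (decide (n ≠ 0) || l.any (fun c => ! pvMList.contains c))) := by
  induction l generalizing n with
  | nil => simp [pvALoop]
  | cons x xs ih =>
    by_cases hd : PySem.Chars.isdigit x = true
    · simp [pvALoop, hd]
    · by_cases htx : x ∈ pvTList
      · simp [pvALoop, hd, htx, List.contains_eq_mem]
      · by_cases hmx : x ∈ pvMList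
        · simp [pvALoop, hd, htx, hmx, List.contains_eq_mem, ih n hn]
        · have h1 : n + 1 ≠ 0 := by omega
          simp [pvALoop, hd, htx, hmx, List.contains_eq_mem, ih (n + 1) (by omega), h1]

-- a set built from l is empty iff no element of l satisfies the filter, stated through any
theorem pv_set_any {p : Char → Bool} (l : List Char) :
    (PySem.Set.ofList l).any p = l.any p := by
  apply Bool.eq_iff_iff.mpr
  simp only [List.any_eq_true]
  constructor
  · rintro ⟨c, hc, hp⟩; exact ⟨c, (PySem.Set.mem_ofList l c).mp hc, hp⟩
  · rintro ⟨c, hc, hp⟩; exact ⟨c, (PySem.Set.mem_ofList l c).mpr hc, hp⟩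

theorem pv_inter_empty (l : List Char) (t : PySem.Set Char) :
    (!(PySem.Set.inter (PySem.Set.ofList l) t).isEmpty) = l.any (fun c => t.contains c) := by
  apply Bool.eq_iff_iff.mpr
  simp only [Bool.not_eq_true', List.isEmpty_eq_false_iff_exists_mem, List.any_eq_true]
  constructor
  · rintro ⟨c, hc⟩
    obtain ⟨h1, h2⟩ := (PySem.Set.mem_inter _ t c).mp hc
    exact ⟨c, (PySem.Set.mem_ofList l c).mp h1, by simpa using h2⟩
  · rintro ⟨c, hc, ht⟩
    exact ⟨c, (PySem.Set.mem_inter _ t c).mpr ⟨(PySem.Set.mem_ofList l c).mpr hc, by simpa using ht⟩⟩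

theorem pv_diff_empty (l : List Char) (m : PySem.Set Char) :
    (!(PySem.Set.diff (PySem.Set.ofList l) m).isEmpty) = l.any (fun c => ! m.contains c) := by
  apply Bool.eq_iff_iff.mpr
  simp only [Bool.not_eq_true', List.isEmpty_eq_false_iff_exists_mem, List.any_eq_true]
  constructor
  · rintro ⟨c, hc⟩
    obtain ⟨h1, h2⟩ := (PySem.Set.mem_diff _ m c).mp hc
    exact ⟨c, (PySem.Set.mem_ofList l c).mp h1, by simpa using h2⟩
  · rintro ⟨c, hc, ht⟩
    refine ⟨c, (PySem.Set.mem_diff _ m c).mpr ⟨(PySem.Set.mem_ofList l c).mpr hc, ?_⟩⟩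
    simpa using ht

-- ===== VERDICT (by name: the statement is the Claim_ definition above) =====
theorem is_validated_english_sentence_spec : Claim_equal_is_validated_english_sentence := by
  intro s _
  unfold Spec_is_validated_english_sentence is_validated_english_sentence is_validated_english_sentence_alt
  rw [pvALoop_eq _ _ (by omega)]
  simp only [pv_set_any, pv_inter_empty, pv_diff_empty]
  have hsplit : (s.toList.any fun c => PySem.Chars.isdigit c || pvTList.contains c) =
      ((s.toList.any fun c => PySem.Chars.isdigit c) ||
        s.toList.any fun c => pvTList.contains c) := by
    apply Bool.eq_iff_iff.mpr
    simp only [List.any_eq_true, Bool.or_eq_true]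
    constructor
    · rintro ⟨c, hc, h | h⟩
      · exact Or.inl ⟨c, hc, h⟩
      · exact Or.inr ⟨c, hc, h⟩
    · rintro (⟨c, hc, h⟩ | ⟨c, hc, h⟩)
      · exact ⟨c, hc, Or.inl h⟩
      · exact ⟨c, hc, Or.inr h⟩
  have htset : pvTSet = pvTList := by
    unfold pvTSet
    apply PySem.Set.ofList_eq_self_of_nodup
    decide
  have hmset : pvMSet = pvMList := by
    unfold pvMSet
    apply PySem.Set.ofList_eq_self_of_nodup
    decide
  rw [htset, hmset, hsplit]
  cases hdt : ((s.toList.any fun c => PySem.Chars.isdigit c) ||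
      s.toList.any fun c => pvTList.contains c) with
  | true =>
    simp
    intro h1 h2
    exfalso
    rw [Bool.or_eq_true] at hdt
    rcases hdt with h | h <;> rw [List.any_eq_true] at h
    · obtain ⟨c, hc, hcd⟩ := h
      exact absurd hcd (by simp [h1 c hc])
    · obtain ⟨c, hc, hct⟩ := h
      exact absurd ((by simpa using hct) : c ∈ pvTList) (h2 c hc)
  | false =>
    simp
    intro x hx _
    rw [Bool.or_eq_false_iff] at hdt
    obtain ⟨hD, hT⟩ := hdt
    rw [List.any_eq_false] at hD hT
    exact ⟨fun y hy => by simpa using hD y hy, fun y hy => by simpa using hT y hy⟩
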